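-- pv_equiv track=rewrite | github.com/PsychoLeo/informatique | algorithmique/fr-ioi/4.2_arbres/length_descriptions.py | longestPred
-- ===== SOURCE A (Python) =====
-- def longestPred (boites, numElem) :
--     distRoot = [0] + [-1]*(numElem)
--
--     def lenToRoot (i) :
--         """Length to get from one node to root"""
--         if distRoot[i] == -1 : # if not visited
--             distRoot[i] = 1 + lenToRoot(boites[i])
--             return distRoot[i]
--         else : # if visited (we have a score for it)
--             return distRoot[i]
--
--     for i in range (1, numElem+1) : # for every element
--         lenToRoot(i) # updating distRoot list
--     return max(distRoot)
-- ===== SOURCE B (Python) =====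
-- def longestPred(boites, numElem):
--     best = 0
--     for i in range(1, numElem + 1):
--         d = 0
--         cur = i
--         while cur != 0:
--             cur = boites[cur]
--             d += 1
--         best = max(best, d)
--     return best
-- ===== Notes on version B (the rewrite author's own statement) =====
-- stated objective: simpler
-- what changed: Replaces the memoized distRoot table and recursive lenToRoot closure with a plain per-node upward walk keeping a running maximum; no auxiliary list, no recursion.
-- outside the precondition, e.g. on longestPred([-2, 0, -3], 2): A returns 1, B returns 3; on longestPred([1, -2], 1): A returns 1, B does not finish within the time limit
import Mathlib
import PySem

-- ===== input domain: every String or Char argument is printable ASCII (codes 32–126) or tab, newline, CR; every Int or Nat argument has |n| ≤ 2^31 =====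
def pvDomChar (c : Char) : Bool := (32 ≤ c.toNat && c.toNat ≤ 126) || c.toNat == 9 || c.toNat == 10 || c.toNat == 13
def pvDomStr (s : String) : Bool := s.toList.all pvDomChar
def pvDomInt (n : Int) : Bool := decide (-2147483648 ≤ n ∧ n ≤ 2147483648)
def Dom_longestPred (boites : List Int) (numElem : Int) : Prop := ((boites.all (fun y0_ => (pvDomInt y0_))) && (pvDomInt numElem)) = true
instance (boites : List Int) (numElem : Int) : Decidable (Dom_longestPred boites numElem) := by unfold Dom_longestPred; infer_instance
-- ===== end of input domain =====

-- B drops A's memo table and recursive closure for a plain per-node upward walk with a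
-- running maximum: simpler, no auxiliary list, no recursion (same results on Pre_).

-- ===== PORT A =====
-- memoized lenToRoot: state = the distRoot table; fuel only makes the recursion total
-- (under Pre_ the chain from i reaches 0 within numElem steps, so fuel numElem+1 is never exhausted);
-- pyGetD / pySetD are exact here because Pre_ keeps every accessed index in range.
def pvLenToRoot (boites : List Int) : Nat → List Int → Int → (Int × List Int)
  | 0, t, _ => (0, t)
  | (f+1), t, i =>
    if PySem.List.pyGetD t i (-1) = -1 then
      ((1 : Int) + (pvLenToRoot boites f t (PySem.List.pyGetD boites i 0)).1,
       PySem.List.pySetD (pvLenToRoot boites f t (PySem.List.pyGetD boites i 0)).2 i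
         (1 + (pvLenToRoot boites f t (PySem.List.pyGetD boites i 0)).1))
    else (PySem.List.pyGetD t i (-1), t)

def longestPred (boites : List Int) (numElem : Int) : Int :=
  (PySem.List.max?
    ((PySem.List.pyRange 1 (numElem+1) 1).foldl
      (fun t i => (pvLenToRoot boites (numElem.toNat+1) t i).2)
      (0 :: List.replicate numElem.toNat (-1)))
    (fun x => x)).getD 0

-- ===== PORT B =====
-- the while-loop 'while cur != 0: cur = boites[cur]; d += 1', fuel for totality only
def pvWalk (boites : List Int) : Nat → Int → Int → Int
  | 0, _, d => d
  | (f+1), cur, d => if cur = 0 then d else pvWalk boites f (PySem.List.pyGetD boites cur 0) (d+1)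

def longestPred_alt (boites : List Int) (numElem : Int) : Int :=
  (PySem.List.pyRange 1 (numElem+1) 1).foldl
      (fun best i => max best (pvWalk boites numElem.toNat i 0)) 0

-- ===== PRECONDITION & SPEC =====
-- one parent-pointer step; node 0 is the root (fixed point)
def pvStep (boites : List Int) (x : Int) : Int :=
  if x = 0 then 0 else PySem.List.pyGetD boites x 0

-- Pre_ excludes inputs whose parent pointers are negative, exceed numElem, or whose chains do not
-- reach node 0 within numElem steps: outside this natural tree domain A either raises/recurses
-- forever or returns a value produced by Python's negative-index wraparound, where B's walk follows
-- a different wrapped path (diverging or returning another accidental value).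
def Pre_longestPred (boites : List Int) (numElem : Int) : Prop :=
  numElem ≤ 0 ∨
  (numElem + 1 ≤ (boites.length : Int) ∧
   ∀ k ∈ List.range numElem.toNat,
     (0 ≤ PySem.List.pyGetD boites ((k : Int)+1) 0 ∧
      PySem.List.pyGetD boites ((k : Int)+1) 0 ≤ numElem) ∧
     (pvStep boites)^[numElem.toNat] ((k : Int)+1) = 0)

instance (boites : List Int) (numElem : Int) : Decidable (Pre_longestPred boites numElem) := by
  unfold Pre_longestPred; infer_instance

def pvWitness_longestPred : List Int × Int := ([0, 0, 1, 2], 3)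

def Spec_longestPred (boites : List Int) (numElem : Int) (out : Int) : Prop := out = longestPred_alt boites numElem
instance (boites : List Int) (numElem : Int) (out : Int) : Decidable (Spec_longestPred boites numElem out) := by unfold Spec_longestPred; infer_instance

-- ===== CLAIM (what is proved, stated in full; the proofs are below) =====
def Claim_equal_longestPred : Prop := ∀ (boites : List Int) (numElem : Int), Dom_longestPred boites numElem → Pre_longestPred boites numElem → Spec_longestPred boites numElem (longestPred boites numElem)

-- ===== LEMMAS AND PROOFS =====

-- depth of a node, with fuel (0 when fuel runs out)
def pvDpt (boites : List Int) : Nat → Int → Int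
  | 0, _ => 0
  | (f+1), i => if i = 0 then 0 else 1 + pvDpt boites f (PySem.List.pyGetD boites i 0)

theorem pvWalk_eq_dpt (boites : List Int) (f : Nat) (i d : Int) :
    pvWalk boites f i d = d + pvDpt boites f i := by
  induction f generalizing i d with
  | zero => simp [pvWalk, pvDpt]
  | succ f ih =>
    simp only [pvWalk, pvDpt]
    split_ifs with h
    · simp
    · rw [ih]; ring

theorem pvDpt_nonneg (boites : List Int) (f : Nat) (i : Int) : 0 ≤ pvDpt boites f i := by
  induction f generalizing i with
  | zero => simp [pvDpt]
  | succ f ih =>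
    simp only [pvDpt]
    split_ifs with h
    · simp
    · have := ih (PySem.List.pyGetD boites i 0); omega

-- stability: once the chain from i reaches 0 in k steps, pvDpt is the same for every fuel ≥ k
theorem pvDpt_stable (boites : List Int) (k : Nat) (i : Int)
    (h : (pvStep boites)^[k] i = 0) :
    ∀ f, k ≤ f → pvDpt boites f i = pvDpt boites k i := by
  induction k generalizing i with
  | zero =>
    simp only [Function.iterate_zero, id] at h
    subst h
    intro f _
    cases f <;> simp [pvDpt]
  | succ k ih =>
    intro f hf
    by_cases hi : i = 0
    · subst hi
      cases f <;> simp [pvDpt]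
    · obtain ⟨f', rfl⟩ : ∃ f', f = f' + 1 := ⟨f - 1, by omega⟩
      rw [Function.iterate_succ_apply] at h
      have hstep : pvStep boites i = PySem.List.pyGetD boites i 0 := by simp [pvStep, hi]
      rw [hstep] at h
      simp only [pvDpt, if_neg hi]
      rw [ih _ h f' (by omega), ih _ h k (le_refl _)]

-- invariant of A's memo table
def pvInv (boites : List Int) (numElem : Int) (t : List Int) : Prop :=
  t.length = numElem.toNat + 1 ∧
  PySem.List.pyGetD t 0 (-1) = 0 ∧
  ∀ j : Int, 1 ≤ j → j ≤ numElem →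
    (PySem.List.pyGetD t j (-1) = -1 ∨
     PySem.List.pyGetD t j (-1) = pvDpt boites numElem.toNat j)

-- memo-recursion correctness: returns the depth, preserves the invariant, records the
-- depth at i, and never disturbs an already-computed entry
theorem pvLen_main (boites : List Int) (numElem : Int)
    (hb : ∀ j : Int, 1 ≤ j → j ≤ numElem →
       0 ≤ PySem.List.pyGetD boites j 0 ∧ PySem.List.pyGetD boites j 0 ≤ numElem)
    (k : Nat) :
    k ≤ numElem.toNat → ∀ (i : Int) (t : List Int) (f : Nat),
    (pvStep boites)^[k] i = 0 → 0 ≤ i → i ≤ numElem → pvInv boites numElem t → k < f →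
    (pvLenToRoot boites f t i).1 = pvDpt boites numElem.toNat i ∧
    pvInv boites numElem (pvLenToRoot boites f t i).2 ∧
    PySem.List.pyGetD (pvLenToRoot boites f t i).2 i (-1) = pvDpt boites numElem.toNat i ∧
    (∀ j : Int, 0 ≤ j → j ≤ numElem → PySem.List.pyGetD t j (-1) ≠ -1 →
       PySem.List.pyGetD (pvLenToRoot boites f t i).2 j (-1) = PySem.List.pyGetD t j (-1)) := by
  induction k with
  | zero =>
    intro _ i t t_f h hi0 hiN hinv hf
    simp only [Function.iterate_zero, id] at h
    subst h
    obtain ⟨hlen, h0, hj⟩ := hinv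
    obtain ⟨f, rfl⟩ : ∃ f', t_f = f' + 1 := ⟨t_f - 1, by omega⟩
    have hne : ¬ (PySem.List.pyGetD t (0:Int) (-1) = -1) := by rw [h0]; decide
    simp only [pvLenToRoot, if_neg hne]
    have hd0 : pvDpt boites numElem.toNat 0 = 0 := by cases numElem.toNat <;> simp [pvDpt]
    exact ⟨by rw [h0, hd0], ⟨hlen, h0, hj⟩, by rw [h0, hd0], fun j _ _ _ => trivial⟩
  | succ k ih =>
    intro hk i t f h hi0 hiN hinv hf
    obtain ⟨f, rfl⟩ : ∃ f', f = f' + 1 := ⟨f - 1, by omega⟩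
    obtain ⟨hlen, h0, hj⟩ := hinv
    by_cases hti : PySem.List.pyGetD t i (-1) = -1
    · -- unvisited: recurse on the parent
      have hine : i ≠ 0 := by intro e; rw [e, h0] at hti; exact absurd hti (by decide)
      have hi1 : 1 ≤ i := by omega
      have hN1 : 1 ≤ numElem := le_trans hi1 hiN
      rw [Function.iterate_succ_apply] at h
      have hstep : pvStep boites i = PySem.List.pyGetD boites i 0 := by simp [pvStep, hine]
      rw [hstep] at h
      obtain ⟨hg0, hgN⟩ := hb i hi1 hiN
      obtain ⟨ih1, ih2, _, ih4⟩ :=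
        ih (by omega) (PySem.List.pyGetD boites i 0) t f h hg0 hgN ⟨hlen, h0, hj⟩ (by omega)
      -- abbreviations
      set g := PySem.List.pyGetD boites i 0 with hg
      set p := pvLenToRoot boites f t g with hp
      -- the computed value is the depth of i
      have hval : (1 : Int) + p.1 = pvDpt boites numElem.toNat i := by
        obtain ⟨m, hm⟩ : ∃ m, numElem.toNat = m + 1 := ⟨numElem.toNat - 1, by omega⟩
        have hstab := pvDpt_stable boites k g h
        rw [ih1, hm]
        have e1 : pvDpt boites (m+1) i = 1 + pvDpt boites m g := by
          simp only [pvDpt, if_neg hine]; rw [← hg]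
        rw [e1, hstab (m+1) (by omega), hstab m (by omega)]
      simp only [pvLenToRoot, if_pos hti]
      rw [← hg, ← hp]
      obtain ⟨plen, p0, pj⟩ := ih2
      have hnlt : i.toNat < p.2.length := by rw [plen]; omega
      have hcast : ((i.toNat : Int)) = i := by omega
      have hget : ∀ (m : Int), 0 ≤ m →
          PySem.List.pyGetD (PySem.List.pySetD p.2 i (1 + p.1)) m (-1)
            = if m = i then 1 + p.1 else PySem.List.pyGetD p.2 m (-1) := by
        intro m hm
        have hmc : ((m.toNat : Int)) = m := by omega
        rw [← hcast, ← hmc,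
            PySem.List.pyGetD_pySetD_natCast p.2 i.toNat m.toNat (1 + p.1) (-1) hnlt,
            hmc, hcast]
        by_cases e : m = i
        · rw [if_pos (by omega : m.toNat = i.toNat), if_pos e]
        · rw [if_neg (by omega : ¬ m.toNat = i.toNat), if_neg e]
      refine ⟨hval, ⟨?_, ?_, ?_⟩, ?_, ?_⟩
      · rw [PySem.List.length_pySetD, plen]
      · rw [hget 0 le_rfl, if_neg (by omega), p0]
      · intro j hj1 hjN
        rw [hget j (by omega)]
        by_cases hji : j = i
        · right; rw [if_pos hji, hval, hji]
        · rw [if_neg hji]; exact pj j hj1 hjN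
      · rw [hget i hi0, if_pos rfl, hval]
      · intro j hj0 hjN hjne
        have hji : j ≠ i := fun e => hjne (e ▸ hti)
        rw [hget j hj0, if_neg hji]
        exact ih4 j hj0 hjN hjne
    · -- visited: return the memoized entry
      simp only [pvLenToRoot, if_neg hti]
      have hval : PySem.List.pyGetD t i (-1) = pvDpt boites numElem.toNat i := by
        by_cases hie : i = 0
        · subst hie
          rw [h0]
          cases numElem.toNat <;> simp [pvDpt]
        · rcases hj i (by omega) hiN with he | he
          · exact absurd he hti
          · exact he
      exact ⟨hval, ⟨hlen, h0, hj⟩, hval, fun j _ _ _ => trivial⟩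

-- folding A's loop over any list of in-range nodes
theorem pvFold_main (boites : List Int) (numElem : Int)
    (hb : ∀ j : Int, 1 ≤ j → j ≤ numElem →
       0 ≤ PySem.List.pyGetD boites j 0 ∧ PySem.List.pyGetD boites j 0 ≤ numElem)
    (hreach : ∀ j : Int, 1 ≤ j → j ≤ numElem → (pvStep boites)^[numElem.toNat] j = 0)
    (l : List Int) :
    ∀ t : List Int, (∀ i ∈ l, 1 ≤ i ∧ i ≤ numElem) → pvInv boites numElem t →
    pvInv boites numElem
      (l.foldl (fun t i => (pvLenToRoot boites (numElem.toNat+1) t i).2) t) ∧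
    (∀ j : Int, 0 ≤ j → j ≤ numElem → PySem.List.pyGetD t j (-1) ≠ -1 →
       PySem.List.pyGetD (l.foldl (fun t i => (pvLenToRoot boites (numElem.toNat+1) t i).2) t) j (-1)
         = PySem.List.pyGetD t j (-1)) ∧
    (∀ i ∈ l, PySem.List.pyGetD
        (l.foldl (fun t i => (pvLenToRoot boites (numElem.toNat+1) t i).2) t) i (-1)
        = pvDpt boites numElem.toNat i) := by
  induction l with
  | nil =>
    intro t _ hinv
    simp only [List.foldl_nil]
    exact ⟨hinv, fun j _ _ _ => trivial, by simp⟩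
  | cons a l ihl =>
    intro t hmem hinv
    simp only [List.foldl_cons]
    obtain ⟨ha1, haN⟩ := hmem a List.mem_cons_self
    obtain ⟨_, hinv1, hset1, hmono1⟩ :=
      pvLen_main boites numElem hb numElem.toNat le_rfl a t (numElem.toNat+1)
        (hreach a ha1 haN) (by omega) haN hinv (by omega)
    obtain ⟨hinvF, hmonoF, hsetF⟩ :=
      ihl ((pvLenToRoot boites (numElem.toNat+1) t a).2)
        (fun i hi => hmem i (List.mem_cons_of_mem _ hi)) hinv1
    refine ⟨hinvF, ?_, ?_⟩
    · intro j hj0 hjN hjne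
      rw [hmonoF j hj0 hjN (by rw [hmono1 j hj0 hjN hjne]; exact hjne),
          hmono1 j hj0 hjN hjne]
    · intro i hi
      rcases List.mem_cons.mp hi with rfl | hi'
      · have hDnn : (0:Int) ≤ pvDpt boites numElem.toNat i := pvDpt_nonneg _ _ _
        rw [hmonoF i (by omega) haN (by rw [hset1]; omega), hset1]
      · exact hsetF i hi'

-- ===== VERDICT (by name: the statement is the Claim_ definition above) =====
theorem longestPred_spec : Claim_equal_longestPred := by
  intro boites numElem _ hpre
  unfold Spec_longestPred longestPred longestPred_alt
  by_cases hN : numElem ≤ 0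
  · rw [PySem.List.pyRange_one_eq_nil (by omega)]
    have h0 : numElem.toNat = 0 := by omega
    simp [h0, PySem.List.max?_id_cons]
  · -- numElem ≥ 1
    rcases hpre with h | ⟨hlen, hforall⟩
    · omega
    have hb : ∀ j : Int, 1 ≤ j → j ≤ numElem →
        0 ≤ PySem.List.pyGetD boites j 0 ∧ PySem.List.pyGetD boites j 0 ≤ numElem := by
      intro j hj1 hjN
      have hmem : j.toNat - 1 ∈ List.range numElem.toNat := List.mem_range.mpr (by omega)
      have he : (((j.toNat - 1 : Nat)) : Int) + 1 = j := by omega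
      obtain ⟨hbj, _⟩ := hforall (j.toNat - 1) hmem
      rw [he] at hbj
      exact hbj
    have hreach : ∀ j : Int, 1 ≤ j → j ≤ numElem →
        (pvStep boites)^[numElem.toNat] j = 0 := by
      intro j hj1 hjN
      have hmem : j.toNat - 1 ∈ List.range numElem.toNat := List.mem_range.mpr (by omega)
      have he : (((j.toNat - 1 : Nat)) : Int) + 1 = j := by omega
      obtain ⟨_, hr⟩ := hforall (j.toNat - 1) hmem
      rw [he] at hr
      exact hr
    -- initial table satisfies the invariant
    have hinv0 : pvInv boites numElem (0 :: List.replicate numElem.toNat (-1)) := by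
      refine ⟨by simp, by rw [PySem.List.pyGetD_zero_cons], ?_⟩
      intro j hj1 hjN
      left
      have hjc : ((j.toNat : Int)) = j := by omega
      rw [← hjc, PySem.List.pyGetD_natCast]
      obtain ⟨m, hm⟩ : ∃ m, j.toNat = m + 1 := ⟨j.toNat - 1, by omega⟩
      rw [hm, List.getD_cons_succ]
      have hmlt : m < numElem.toNat := by omega
      simp [List.getD, hmlt]
    obtain ⟨⟨hlenF, h0F, _⟩, _, hsetF⟩ :=
      pvFold_main boites numElem hb hreach (PySem.List.pyRange 1 (numElem+1) 1)
        (0 :: List.replicate numElem.toNat (-1))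
        (fun i hi => by
          have := PySem.List.mem_pyRange_one.mp hi
          exact ⟨this.1, by omega⟩)
        hinv0
    set tF := (PySem.List.pyRange 1 (numElem+1) 1).foldl
        (fun t i => (pvLenToRoot boites (numElem.toNat+1) t i).2)
        (0 :: List.replicate numElem.toNat (-1)) with htF
    -- the final table is exactly the list of depths
    have hchar : tF = (List.range (numElem.toNat+1)).map
        (fun (n : Nat) => pvDpt boites numElem.toNat ((n : Nat) : Int)) := by
      apply List.ext_getElem (by simp [hlenF])
      intro n h1 h2
      have hlt : (n : Int) < (tF.length : Int) := by omega
      have hgd : PySem.List.pyGetD tF (n : Int) (-1) = tF[n] := by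
        rw [PySem.List.pyGetD_eq_getElem _ _ (by omega) hlt]
        simp
      rcases Nat.eq_zero_or_pos n with rfl | hn
      · have : tF[0] = (0:Int) := by rw [← hgd]; exact_mod_cast h0F
        rw [this]
        simp only [List.getElem_map, List.getElem_range]
        cases numElem.toNat <;> simp [pvDpt]
      · have hmem : ((n : Int)) ∈ PySem.List.pyRange 1 (numElem+1) 1 := by
          rw [PySem.List.mem_pyRange_one]
          constructor
          · omega
          · rw [hlenF] at h1; omega
        have := hsetF (n : Int) hmem
        rw [hgd] at this
        rw [this]
        simp only [List.getElem_map, List.getElem_range]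
    rw [hchar]
    have hrs : List.range (numElem.toNat + 1)
        = 0 :: (List.range numElem.toNat).map Nat.succ := List.range_succ_eq_map
    rw [hrs]
    simp only [List.map_cons, List.map_map, Nat.cast_zero]
    have hd0 : pvDpt boites numElem.toNat (0 : Int) = 0 := by
      cases numElem.toNat <;> simp [pvDpt]
    rw [hd0, PySem.List.max?_id_cons]
    simp only [Option.getD_some]
    -- B's side: same fold over the same range
    rw [PySem.List.pyRange_one 1 (numElem+1)]
    have he1 : (numElem + 1 - 1).toNat = numElem.toNat := by omega
    rw [he1, List.foldl_map, List.foldl_map]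
    apply List.foldl_ext
    intro b n _
    simp only [Function.comp_apply]
    rw [pvWalk_eq_dpt]
    have : ((Nat.succ n : Nat) : Int) = 1 + (n : Int) := by omega
    rw [this]
    omega
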